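-- pv_equiv track=rewrite | github.com/denandreychuk/Gamma-cipher | main.py | generateGamma
-- ===== SOURCE A (Python) =====
-- def generateGamma(y0, y1, y2, len):
--     y = [y0, y1, y2]
--     for i in range(3, len + 1):
--         yi = (y[i - 1] + y[i - 3]) % len
--         y.append(yi)
--
--     z = []
--     for i in range(len):
--         zi = (y[i] + y[i + 1]) % len
--         z.append(zi)
--
--     return z
-- ===== SOURCE B (Python) =====
-- def generateGamma(y0, y1, y2, len):
--     # One fused pass with a 3-term sliding window instead of building the full y list then rescanning.
--     z = []
--     a, b, c = y0, y1, y2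
--     for _ in range(len):
--         z.append((a + b) % len)
--         a, b, c = b, c, (c + a) % len
--     return z
-- ===== Notes on version B (the rewrite author's own statement) =====
-- stated objective: faster
-- what changed: B fuses A's two passes (build the whole y list, then rescan it to form z) into a single loop that keeps only a 3-term sliding window (a,b,c) and emits each z term on the fly: constant auxiliary space, no list growth or indexed rescans.
import Mathlib
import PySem

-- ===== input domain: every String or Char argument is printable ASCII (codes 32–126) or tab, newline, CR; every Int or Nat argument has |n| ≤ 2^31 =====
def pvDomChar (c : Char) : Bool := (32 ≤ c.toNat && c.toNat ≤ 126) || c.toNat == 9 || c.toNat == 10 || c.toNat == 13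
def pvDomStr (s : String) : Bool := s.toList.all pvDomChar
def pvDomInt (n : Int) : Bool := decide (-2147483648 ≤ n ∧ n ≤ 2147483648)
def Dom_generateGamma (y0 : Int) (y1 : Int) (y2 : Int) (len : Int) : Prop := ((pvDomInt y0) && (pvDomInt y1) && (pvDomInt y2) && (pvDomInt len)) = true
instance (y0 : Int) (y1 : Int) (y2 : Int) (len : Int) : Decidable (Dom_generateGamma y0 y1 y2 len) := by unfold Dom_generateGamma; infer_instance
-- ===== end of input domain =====

-- B fuses A's two linear passes into one loop over a 3-term sliding window (no y list, no rescan); same values, constant space.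

-- ===== PORT A =====
def generateGamma (y0 : Int) (y1 : Int) (y2 : Int) (len : Int) : List Int :=
  let y : List Int :=
    (PySem.List.pyRange 3 (len + 1) 1).foldl
      (fun y i =>
        y ++ [PySem.Int.mod (PySem.List.pyGetD y (i - 1) 0 + PySem.List.pyGetD y (i - 3) 0) len])
      [y0, y1, y2]
  (PySem.List.pyRange 0 len 1).foldl
    (fun z i =>
      z ++ [PySem.Int.mod (PySem.List.pyGetD y i 0 + PySem.List.pyGetD y (i + 1) 0) len])
    []

-- ===== PORT B =====
-- B's loop: 'for _ in range(len)' with sliding window (a, b, c) and accumulator z.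
def gammaAltLoop (len : Int) : Nat → Int → Int → Int → List Int → List Int
  | 0, _, _, _, z => z
  | n + 1, a, b, c, z =>
      gammaAltLoop len n b c (PySem.Int.mod (c + a) len) (z ++ [PySem.Int.mod (a + b) len])

def generateGamma_alt (y0 : Int) (y1 : Int) (y2 : Int) (len : Int) : List Int :=
  gammaAltLoop len len.toNat y0 y1 y2 []

-- ===== PRECONDITION & SPEC =====
def Spec_generateGamma (y0 : Int) (y1 : Int) (y2 : Int) (len : Int) (out : List Int) : Prop := out = generateGamma_alt y0 y1 y2 len
instance (y0 : Int) (y1 : Int) (y2 : Int) (len : Int) (out : List Int) : Decidable (Spec_generateGamma y0 y1 y2 len out) := by unfold Spec_generateGamma; infer_instance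

-- ===== CLAIM (what is proved, stated in full; the proofs are below) =====
def Claim_equal_generateGamma : Prop := ∀ (y0 : Int) (y1 : Int) (y2 : Int) (len : Int), Dom_generateGamma y0 y1 y2 len → Spec_generateGamma y0 y1 y2 len (generateGamma y0 y1 y2 len)

-- ===== LEMMAS AND PROOFS =====

-- The mathematical gamma recurrence both programs realise.
def ySeq (y0 y1 y2 len : Int) : Nat → Int
  | 0 => y0
  | 1 => y1
  | 2 => y2
  | n + 3 => PySem.Int.mod (ySeq y0 y1 y2 len (n + 2) + ySeq y0 y1 y2 len n) len

-- A's first loop, truncated to its first k steps, builds exactly the first 3+k terms of ySeq.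
lemma yfold_eq (y0 y1 y2 len : Int) (k : Nat) :
    ((List.range k).map (fun j : Nat => (3 : Int) + (j : Int))).foldl
      (fun y i =>
        y ++ [PySem.Int.mod (PySem.List.pyGetD y (i - 1) 0 + PySem.List.pyGetD y (i - 3) 0) len])
      [y0, y1, y2]
    = (List.range (3 + k)).map (ySeq y0 y1 y2 len) := by
  induction k with
  | zero =>
      simp [List.range_succ, ySeq]
  | succ k ih =>
      rw [List.range_succ, List.map_append, List.foldl_append, ih]
      have h1 : (3 : Int) + (k : Int) - 1 = ((k + 2 : Nat) : Int) := by omega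
      have h3 : (3 : Int) + (k : Int) - 3 = ((k : Nat) : Int) := by omega
      simp only [List.map_cons, List.map_nil, List.foldl_cons, List.foldl_nil, h1, h3,
        PySem.List.pyGetD_natCast]
      have g1 : ((List.range (3 + k)).map (ySeq y0 y1 y2 len)).getD (k + 2) 0
          = ySeq y0 y1 y2 len (k + 2) := by
        rw [List.getD_eq_getElem ((List.range (3 + k)).map (ySeq y0 y1 y2 len)) 0 (by simp; omega)]
        simp
      have g3 : ((List.range (3 + k)).map (ySeq y0 y1 y2 len)).getD k 0
          = ySeq y0 y1 y2 len k := by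
        rw [List.getD_eq_getElem ((List.range (3 + k)).map (ySeq y0 y1 y2 len)) 0 (by simp)]
        simp
      rw [g1, g3]
      have : 3 + (k + 1) = (3 + k) + 1 := by omega
      rw [this, List.range_succ, List.map_append]
      simp [ySeq, Nat.add_comm]

-- B's loop appends the adjacent-sum terms starting at position j when seeded with window (ySeq j, ySeq (j+1), ySeq (j+2)).
lemma gammaAltLoop_eq (y0 y1 y2 len : Int) (k : Nat) :
    ∀ (j : Nat) (z : List Int),
      gammaAltLoop len k (ySeq y0 y1 y2 len j) (ySeq y0 y1 y2 len (j + 1)) (ySeq y0 y1 y2 len (j + 2)) z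
      = z ++ (List.range k).map
          (fun t => PySem.Int.mod (ySeq y0 y1 y2 len (j + t) + ySeq y0 y1 y2 len (j + t + 1)) len) := by
  induction k with
  | zero => intro j z; simp [gammaAltLoop]
  | succ k ih =>
      intro j z
      rw [gammaAltLoop]
      have hc : PySem.Int.mod (ySeq y0 y1 y2 len (j + 2) + ySeq y0 y1 y2 len j) len
          = ySeq y0 y1 y2 len (j + 3) := rfl
      rw [hc]
      have key := ih (j + 1) (z ++ [PySem.Int.mod (ySeq y0 y1 y2 len j + ySeq y0 y1 y2 len (j + 1)) len])
      rw [show (j + 1) + 1 = j + 2 from rfl, show (j + 1) + 2 = j + 3 from rfl] at key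
      rw [key, List.append_assoc]
      congr 1
      rw [List.range_succ_eq_map, List.map_cons, List.map_map]
      simp only [List.cons_append, List.nil_append]
      congr 1
      refine List.map_congr_left fun t _ => ?_
      have e : j + 1 + t = j + (t + 1) := by omega
      rw [e]
      simp [Function.comp]

-- ===== VERDICT (by name: the statement is the Claim_ definition above) =====
-- A's second loop, written as a map over indices of the fully-built y list.
lemma portA_eq_map (y0 y1 y2 len : Int) (h : 0 < len) :
    generateGamma y0 y1 y2 len
    = (List.range len.toNat).map
        (fun t => PySem.Int.mod (ySeq y0 y1 y2 len t + ySeq y0 y1 y2 len (t + 1)) len) := by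
  unfold generateGamma
  rw [PySem.List.pyRange_one, PySem.List.pyRange_one]
  have h13 : (len + 1 - 3).toNat = (len - 2).toNat := by omega
  rw [h13, yfold_eq]
  have hz : (len - 0).toNat = len.toNat := by omega
  rw [hz, PySem.List.foldl_append_singleton_eq_map, List.map_map]
  refine List.map_congr_left fun t ht => ?_
  have htn : t < len.toNat := List.mem_range.mp ht
  have hN : t + 1 < 3 + (len - 2).toNat := by omega
  simp only [Function.comp_apply, zero_add]
  have e1 : PySem.List.pyGetD ((List.range (3 + (len - 2).toNat)).map (ySeq y0 y1 y2 len)) (t : Int) 0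
      = ySeq y0 y1 y2 len t := by
    rw [PySem.List.pyGetD_natCast, List.getD_eq_getElem _ _ (by simp; omega)]
    simp
  have e2 : PySem.List.pyGetD ((List.range (3 + (len - 2).toNat)).map (ySeq y0 y1 y2 len)) ((t : Int) + 1) 0
      = ySeq y0 y1 y2 len (t + 1) := by
    have : ((t : Int) + 1) = ((t + 1 : Nat) : Int) := by omega
    rw [this, PySem.List.pyGetD_natCast, List.getD_eq_getElem _ _ (by simp; omega)]
    simp
  rw [e1, e2]

-- ===== VERDICT (by name: the statement is the Claim_ definition above) =====
theorem generateGamma_spec : Claim_equal_generateGamma := by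
  intro y0 y1 y2 len _
  unfold Spec_generateGamma
  by_cases h : len ≤ 0
  · have hn : len.toNat = 0 := by omega
    have ha : generateGamma y0 y1 y2 len = [] := by
      unfold generateGamma
      rw [PySem.List.pyRange_one, PySem.List.pyRange_one]
      have h1 : (len + 1 - 3).toNat = 0 := by omega
      have h2 : (len - 0).toNat = 0 := by omega
      rw [h1, h2]
      simp
    rw [ha]
    unfold generateGamma_alt
    rw [hn]
    rfl
  · have h' : 0 < len := by omega
    rw [portA_eq_map y0 y1 y2 len h']
    unfold generateGamma_alt
    have hb := gammaAltLoop_eq y0 y1 y2 len len.toNat 0 []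
    simp only [Nat.zero_add, List.nil_append] at hb
    exact hb.symm
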